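-- pv_equiv track=rewrite | github.com/farah-rubena/Coding_Bat_Python_examples | Warmup-2/string_match.py | string_match
-- ===== SOURCE A (Python) =====
-- def string_match(a, b):
--
--     shorter = min(len(a), len(b))
--     count = 0
--
--     for _ in range(shorter-1):
--         a_sub = a[_:_+2]
--         b_sub = b[_:_+2]
--         if a_sub == b_sub:
--             count += 1
--
--     return count
-- ===== SOURCE B (Python) =====
-- def string_match(a, b):
--     # Runs identity: the number of adjacent matched pairs equals
--     # (total matching positions) - (number of maximal runs of matches).
--     matches = 0
--     runs = 0
--     prev = False
--     for x, y in zip(a, b):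
--         if x == y:
--             matches += 1
--             if not prev:
--                 runs += 1
--             prev = True
--         else:
--             prev = False
--     return matches - runs
-- ===== Notes on version B (the rewrite author's own statement) =====
-- stated objective: alternative
-- what changed: Instead of comparing two-character slices at each index, B uses the run-length identity (adjacent matched pairs = matching positions - number of maximal runs of matches): one zip pass counting matches and run starts, returning matches - runs.
import Mathlib
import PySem

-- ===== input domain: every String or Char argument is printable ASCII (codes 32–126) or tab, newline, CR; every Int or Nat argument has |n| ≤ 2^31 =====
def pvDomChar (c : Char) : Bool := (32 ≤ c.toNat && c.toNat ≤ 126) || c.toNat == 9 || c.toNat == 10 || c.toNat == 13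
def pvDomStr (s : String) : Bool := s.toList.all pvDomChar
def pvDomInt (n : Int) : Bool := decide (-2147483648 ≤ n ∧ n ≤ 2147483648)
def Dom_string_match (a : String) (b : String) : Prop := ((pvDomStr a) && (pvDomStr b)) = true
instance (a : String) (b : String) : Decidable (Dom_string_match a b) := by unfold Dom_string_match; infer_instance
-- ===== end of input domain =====

-- B replaces the slice-comparison loop by the run-length identity: adjacent matched
-- pairs = matching positions - maximal runs of matches, computed in one zip pass.

-- ===== PORT A =====
def string_match (a : String) (b : String) : Int :=
  let shorter : Int := min (PySem.Str.len a) (PySem.Str.len b)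
  (PySem.List.pyRange 0 (shorter - 1) 1).foldl
    (fun count i =>
      let a_sub := PySem.Str.slice a (some i) (some (i + 2))
      let b_sub := PySem.Str.slice b (some i) (some (i + 2))
      if a_sub == b_sub then count + 1 else count) 0

-- ===== PORT B =====
def string_match_alt (a : String) (b : String) : Int :=
  let st := (a.toList.zip b.toList).foldl
    (fun (s : Int × Int × Bool) (p : Char × Char) =>
      if p.1 == p.2 then (s.1 + 1, (if !s.2.2 then s.2.1 + 1 else s.2.1), true)
      else (s.1, s.2.1, false))
    (0, 0, false)
  st.1 - st.2.1

-- ===== PRECONDITION & SPEC =====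
def Spec_string_match (a : String) (b : String) (out : Int) : Prop := out = string_match_alt a b
instance (a : String) (b : String) (out : Int) : Decidable (Spec_string_match a b out) := by unfold Spec_string_match; infer_instance

-- ===== CLAIM (what is proved, stated in full; the proofs are below) =====
def Claim_equal_string_match : Prop := ∀ (a : String) (b : String), Dom_string_match a b → Spec_string_match a b (string_match a b)

-- ===== LEMMAS AND PROOFS =====

-- adjacent-pair counter on the boolean match list, threading the previous value
def pvAdj : Bool → List Bool → Int
  | _, [] => 0
  | prev, x :: t => (if prev && x then 1 else 0) + pvAdj x t

theorem take_two_drop {α : Type} (xs : List α) (k : Nat) (h : k + 1 < xs.length) :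
    (xs.drop k).take 2 = [xs[k], xs[k + 1]] := by
  apply List.ext_getElem
  · simp; omega
  · intro n hn1 hn2
    simp only [List.getElem_take, List.getElem_drop]
    have h2 : n < 2 := by
      have := hn1; simp at this; omega
    interval_cases n <;> simp

-- A-side step 1: string_match equals a countP over pyRange of adjacent both-true tests on the match list
theorem A_to_countP (a b : String) :
    string_match a b =
      (((PySem.List.pyRange 0 ((((a.toList.zip b.toList).map (fun p => p.1 == p.2)).length : Int) - 1) 1).countP
        (fun i =>
          PySem.List.pyGetD ((a.toList.zip b.toList).map (fun p => p.1 == p.2)) i false &&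
          PySem.List.pyGetD ((a.toList.zip b.toList).map (fun p => p.1 == p.2)) (i + 1) false) : Nat) : Int) := by
  unfold string_match
  simp only [PySem.Str.len_eq, PySem.List.foldl_if_add_one, zero_add,
    List.length_map, List.length_zip, Nat.cast_min]
  congr 1
  apply List.countP_congr
  intro i hi
  rw [PySem.List.mem_pyRange_one] at hi
  obtain ⟨h0, h1⟩ := hi
  set la := a.toList.length with hla
  set lb := b.toList.length with hlb
  obtain ⟨k, rfl⟩ : ∃ k : Nat, i = (k : Int) := ⟨i.toNat, by omega⟩
  have hka : k + 1 < la := by omega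
  have hkb : k + 1 < lb := by omega
  have hslice : ∀ (s : String) (hs : k + 1 < s.toList.length),
      (PySem.Str.slice s (some (k : Int)) (some ((k : Int) + 2))).toList
        = [s.toList[k]'(by omega), s.toList[k + 1]'hs] := by
    intro s hs
    rw [PySem.Str.toList_slice, PySem.Chars.slice_eq_listSlice]
    have e2 : ((k : Int) + 2) = ((k : Int) + ((2 : Nat) : Int)) := by norm_num
    rw [e2, PySem.List.slice_natCast_add]
    exact take_two_drop s.toList k hs
  have hA : (PySem.Str.slice a (some (k : Int)) (some ((k : Int) + 2)) ==
             PySem.Str.slice b (some (k : Int)) (some ((k : Int) + 2)))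
      = ((a.toList[k]'(by omega) == b.toList[k]'(by omega)) &&
         (a.toList[k + 1]'hka == b.toList[k + 1]'hkb)) := by
    rw [Bool.eq_iff_iff]
    simp only [beq_iff_eq, Bool.and_eq_true]
    constructor
    · intro h
      have h' := congrArg String.toList h
      rw [hslice a hka, hslice b hkb] at h'
      simp only [List.cons.injEq, and_true] at h'
      exact ⟨h'.1, h'.2⟩
    · rintro ⟨h1', h2'⟩
      apply String.toList_injective
      rw [hslice a hka, hslice b hkb, h1', h2']
  have hB : ∀ (j : Nat) (hj : j < min la lb),
      PySem.List.pyGetD ((a.toList.zip b.toList).map (fun p => p.1 == p.2)) ((j : Nat) : Int) false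
      = (a.toList[j]'(by omega) == b.toList[j]'(by omega)) := by
    intro j hj
    rw [PySem.List.pyGetD_natCast]
    rw [List.getD_eq_getElem _ _ (by simp only [List.length_map, List.length_zip]; omega)]
    simp
  have hcast : ((k : Int) + 1) = (((k + 1 : Nat) : Nat) : Int) := by push_cast; ring
  rw [hA, hcast, hB k (by omega), hB (k + 1) (by omega)]

-- A-side step 2: that countP equals pvAdj threaded from x over the tail
theorem countP_range_adj (t : List Bool) (x : Bool) :
    (((List.range ((x :: t).length - 1)).countP
        (fun k => (x :: t).getD k false && (x :: t).getD (k + 1) false) : Nat) : Int)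
      = pvAdj x t := by
  induction t generalizing x with
  | nil => simp [pvAdj]
  | cons y t' ih =>
    have hlen : (x :: y :: t').length - 1 = ((y :: t').length - 1) + 1 := by
      simp
    rw [hlen, List.range_succ_eq_map]
    rw [List.countP_cons]
    rw [List.countP_map]
    have : ((List.range ((y :: t').length - 1)).countP
        ((fun k => (x :: y :: t').getD k false && (x :: y :: t').getD (k + 1) false) ∘ (· + 1)))
        = ((List.range ((y :: t').length - 1)).countP
        (fun k => (y :: t').getD k false && (y :: t').getD (k + 1) false)) := by
      apply List.countP_congr
      intro k _
      simp [Function.comp]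
    rw [this]
    have := ih y
    push_cast
    rw [this]
    simp [pvAdj]
    cases x <;> cases y <;> simp [add_comm]

-- bridge: countP over pyRange 0 (L-1) with pyGetD = countP over List.range with getD
theorem countP_pyRange_to_range (m : List Bool) :
    ((PySem.List.pyRange 0 ((m.length : Int) - 1) 1).countP
        (fun i => PySem.List.pyGetD m i false && PySem.List.pyGetD m (i + 1) false))
      = ((List.range (m.length - 1)).countP
        (fun k => m.getD k false && m.getD (k + 1) false)) := by
  rw [PySem.List.pyRange_one]
  rw [List.countP_map]
  have hlen : (((m.length : Int) - 1) - 0).toNat = m.length - 1 := by omega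
  rw [hlen]
  apply List.countP_congr
  intro k _
  simp only [Function.comp, zero_add]
  rw [PySem.List.pyGetD_natCast]
  have hcast : ((k : Int) + 1) = (((k + 1 : Nat) : Nat) : Int) := by push_cast; ring
  rw [hcast, PySem.List.pyGetD_natCast]

-- B-side: the fold computes matches - runs = pvAdj prev over the match list
theorem B_fold_adj (l : List Bool) (ma ru : Int) (prev : Bool) :
    (let st := l.foldl
        (fun (s : Int × Int × Bool) (x : Bool) =>
          if x then (s.1 + 1, (if !s.2.2 then s.2.1 + 1 else s.2.1), true)
          else (s.1, s.2.1, false)) (ma, ru, prev)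
     st.1 - st.2.1) = ma - ru + pvAdj prev l := by
  induction l generalizing ma ru prev with
  | nil => simp [pvAdj]
  | cons x t ih =>
    cases x <;> cases prev <;>
      simp only [List.foldl_cons, if_true, Bool.not_true, Bool.not_false,
        pvAdj, Bool.and_self, Bool.and_false, Bool.and_true] <;>
      rw [ih] <;> ring_nf <;> simp

theorem countP_range_adj_false (m : List Bool) :
    (((List.range (m.length - 1)).countP
        (fun k => m.getD k false && m.getD (k + 1) false) : Nat) : Int)
      = pvAdj false m := by
  cases m with
  | nil => simp [pvAdj]
  | cons x t =>
    rw [countP_range_adj t x]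
    simp [pvAdj]

theorem string_match_key (a b : String) :
    string_match a b = string_match_alt a b := by
  have hA := A_to_countP a b
  rw [countP_pyRange_to_range] at hA
  rw [countP_range_adj_false] at hA
  have hB := B_fold_adj ((a.toList.zip b.toList).map (fun p => p.1 == p.2)) 0 0 false
  simp only [List.foldl_map] at hB
  rw [hA]
  unfold string_match_alt
  rw [hB]
  ring

-- ===== VERDICT (by name: the statement is the Claim_ definition above) =====
theorem string_match_spec : Claim_equal_string_match := by
  intro a b _
  unfold Spec_string_match
  exact string_match_key a b
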